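-- pv_equiv track=rewrite | github.com/Brennan-Chesley-FLP/westlean | westlean/algorithms/fivatech.py | _map_to_backbone
-- ===== SOURCE A (Python) =====
-- def _map_to_backbone(seq: list[str], backbone: list[str]) -> list[int]:
--     """Map backbone positions to indices in *seq* (greedy left-to-right).
--
--     Since *backbone* is the LCS of all sequences, it is guaranteed to be
--     a subsequence of *seq*, so the mapping always succeeds.
--     """
--     result: list[int] = []
--     j = 0
--     for tag in backbone:
--         while seq[j] != tag:
--             j += 1
--         result.append(j)
--         j += 1
--     return result
-- ===== SOURCE B (Python) =====
-- def _lower_bound(a: list[int], x: int) -> int: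
--     """First position p with a[p] >= x in a sorted list (len(a) if none)."""
--     lo, hi = 0, len(a)
--     while lo < hi:
--         mid = (lo + hi) // 2
--         if a[mid] < x:
--             lo = mid + 1
--         else:
--             hi = mid
--     return lo
--
--
-- def _map_to_backbone(seq: list[str], backbone: list[str]) -> list[int]:
--     """Index the occurrences of every tag once, then binary-search per backbone tag."""
--     occ: dict[str, list[int]] = {}
--     for i, s in enumerate(seq):
--         occ.setdefault(s, []).append(i)
--     result: list[int] = []
--     j = 0
--     for tag in backbone:
--         idxs = occ.get(tag, [])
--         p = _lower_bound(idxs, j)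
--         if p == len(idxs):
--             raise IndexError("backbone is not a subsequence of seq")
--         j = idxs[p]
--         result.append(j)
--         j += 1
--     return result
-- ===== Notes on version B (the rewrite author's own statement) =====
-- stated objective: alternative
-- what changed: Replaces A's two-pointer scan of seq with a precomputed occurrence index (dict tag -> sorted list of positions) queried by a hand-written binary search (lower bound >= current position) for each backbone tag.
import Mathlib
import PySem

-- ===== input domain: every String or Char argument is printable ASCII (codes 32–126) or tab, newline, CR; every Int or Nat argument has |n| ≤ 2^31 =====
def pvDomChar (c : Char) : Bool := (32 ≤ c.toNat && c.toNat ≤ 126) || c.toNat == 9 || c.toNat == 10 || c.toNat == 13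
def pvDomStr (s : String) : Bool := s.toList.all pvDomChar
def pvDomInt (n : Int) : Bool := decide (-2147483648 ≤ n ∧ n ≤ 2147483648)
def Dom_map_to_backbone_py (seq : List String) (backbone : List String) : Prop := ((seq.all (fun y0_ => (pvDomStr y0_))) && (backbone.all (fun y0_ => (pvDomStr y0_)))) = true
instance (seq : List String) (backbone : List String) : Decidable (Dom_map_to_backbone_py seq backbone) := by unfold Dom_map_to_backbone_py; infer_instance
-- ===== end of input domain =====

-- B replaces A's two-pointer scan of seq with a precomputed per-tag occurrence index queried by a
-- hand-written binary search per backbone tag (alternative algorithm, similar cost).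


-- ===== PORT A =====
-- 'while seq[j] != tag: j += 1' — scans from j for the first index holding tag;
-- 'none' is Python's IndexError (seq[j] with j ≥ len raises; j is always ≥ 0 here, so the
-- bound check 'j < seq.length' is exact).
def pvFindFrom (seq : List String) (tag : String) (j : Nat) : Option Nat :=
  if h : j < seq.length then
    if seq[j] = tag then some j else pvFindFrom seq tag (j + 1)
  else none
termination_by seq.length - j

-- the 'for tag in backbone' loop with state (result accumulated by cons) and j;
-- on IndexError the remaining output is cut off (outside Pre_, nothing is claimed there).
def pvALoop (seq : List String) (backbone : List String) (j : Nat) : List Int :=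
  match backbone with
  | [] => []
  | tag :: rest =>
    match pvFindFrom seq tag j with
    | none => []
    | some j' => (j' : Int) :: pvALoop seq rest (j' + 1)

def map_to_backbone_py (seq : List String) (backbone : List String) : List Int :=
  pvALoop seq backbone 0

-- ===== PORT B =====
-- Source B's hand-written '_lower_bound': lo/hi are nonnegative Python ints, ported as Nat;
-- (lo+hi)//2 on nonnegative ints is Nat division; 'a[mid]' is ported as 'a.getD mid 0' —
-- exact because every call keeps lo ≤ mid < hi ≤ len(a), so the index is always in range.
def pvLB (a : List Int) (x : Int) (lo hi : Nat) : Nat :=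
  if _h : lo < hi then
    if a.getD ((lo + hi) / 2) 0 < x then pvLB a x ((lo + hi) / 2 + 1) hi
    else pvLB a x lo ((lo + hi) / 2)
  else lo
termination_by hi - lo
decreasing_by all_goals omega

-- 'for i, s in enumerate(seq): occ.setdefault(s, []).append(i)'
def pvBuildOcc (seq : List String) : PySem.Dict String (List Int) :=
  (PySem.List.enumerate seq 0).foldl
    (fun d p => d.insert p.2 (d.getD p.2 [] ++ [p.1])) PySem.Dict.empty

-- 'for tag in backbone' with occ.get(tag, []), the binary search, and j; the explicit
-- 'raise IndexError' when the search finds nothing cuts the output off (outside Pre_).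
def pvAltLoop (occ : PySem.Dict String (List Int)) (backbone : List String) (j : Int) : List Int :=
  match backbone with
  | [] => []
  | tag :: rest =>
    let idxs := occ.getD tag []
    let p := pvLB idxs j 0 idxs.length
    if p = idxs.length then []
    else
      -- 'j = idxs[p]' — in range since p < len(idxs)
      let j' := idxs.getD p 0
      j' :: pvAltLoop occ rest (j' + 1)

def map_to_backbone_py_alt (seq : List String) (backbone : List String) : List Int :=
  pvAltLoop (pvBuildOcc seq) backbone 0

-- ===== PRECONDITION & SPEC =====
-- Python A raises IndexError exactly when backbone is not a subsequence of seq (greedy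
-- left-to-right matching succeeds iff a subsequence embedding exists); Pre_ excludes those
-- inputs (B raises IndexError there too).
def Pre_map_to_backbone_py (seq : List String) (backbone : List String) : Prop :=
  backbone.Sublist seq
instance (seq : List String) (backbone : List String) : Decidable (Pre_map_to_backbone_py seq backbone) := by unfold Pre_map_to_backbone_py; infer_instance

def pvWitness_map_to_backbone_py : List String × List String := (["a", "b", "c", "b"], ["a", "b"])

def Spec_map_to_backbone_py (seq : List String) (backbone : List String) (out : List Int) : Prop := out = map_to_backbone_py_alt seq backbone
instance (seq : List String) (backbone : List String) (out : List Int) : Decidable (Spec_map_to_backbone_py seq backbone out) := by unfold Spec_map_to_backbone_py; infer_instance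

-- ===== CLAIM (what is proved, stated in full; the proofs are below) =====
def Claim_equal_map_to_backbone_py : Prop := ∀ (seq : List String) (backbone : List String), Dom_map_to_backbone_py seq backbone → Pre_map_to_backbone_py seq backbone → Spec_map_to_backbone_py seq backbone (map_to_backbone_py seq backbone)

-- ===== LEMMAS AND PROOFS =====

def pvOccList (seq : List String) (tag : String) (s : Int) : List Int :=
  match seq with
  | [] => []
  | x :: xs => if x = tag then s :: pvOccList xs tag (s + 1) else pvOccList xs tag (s + 1)

theorem pvFold_getD (ps : List (Int × String)) (d : PySem.Dict String (List Int)) (tag : String) :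
    (ps.foldl (fun d p => d.insert p.2 (d.getD p.2 [] ++ [p.1])) d).getD tag []
      = d.getD tag [] ++ (ps.filter (fun p => p.2 == tag)).map (·.1) := by
  induction ps generalizing d with
  | nil => simp
  | cons p rest ih =>
    simp only [List.foldl_cons, List.filter_cons, ih]
    by_cases h : p.2 = tag
    · simp [h, PySem.Dict.getD_insert_self]
    · rw [PySem.Dict.getD_insert_of_ne _ _ _ (fun he => h he.symm)]
      simp [h]

theorem pvEnum_filter_map (seq : List String) (tag : String) (s : Int) :
    ((PySem.List.enumerate seq s).filter (fun p => p.2 == tag)).map (·.1)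
      = pvOccList seq tag s := by
  induction seq generalizing s with
  | nil => simp [pvOccList, PySem.List.enumerate_nil]
  | cons x xs ih =>
    simp only [PySem.List.enumerate_cons, List.filter_cons, pvOccList]
    by_cases h : x = tag
    · simp [h, ih]
    · simp [h, ih]

theorem pvBuildOcc_getD (seq : List String) (tag : String) :
    (pvBuildOcc seq).getD tag [] = pvOccList seq tag 0 := by
  unfold pvBuildOcc
  rw [pvFold_getD, pvEnum_filter_map]
  simp [PySem.Dict.empty, PySem.Dict.getD, PySem.Dict.get?]

theorem pvOccList_mem (seq : List String) (tag : String) (s v : Int) :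
    v ∈ pvOccList seq tag s ↔ ∃ k : Nat, ∃ h : k < seq.length, v = s + k ∧ seq[k] = tag := by
  induction seq generalizing s with
  | nil => simp [pvOccList]
  | cons x xs ih =>
    simp only [pvOccList]
    constructor
    · intro hv
      by_cases h : x = tag
      · rw [if_pos h] at hv
        rcases List.mem_cons.mp hv with hv | hv
        · exact ⟨0, by simp, by simpa using hv, by simpa using h⟩
        · rcases (ih (s+1)).mp hv with ⟨k, hk, hvk, htag⟩
          exact ⟨k+1, by simpa using hk, by omega, by simpa using htag⟩
      · rw [if_neg h] at hv
        rcases (ih (s+1)).mp hv with ⟨k, hk, hvk, htag⟩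
        exact ⟨k+1, by simpa using hk, by omega, by simpa using htag⟩
    · rintro ⟨k, hk, hvk, htag⟩
      cases k with
      | zero =>
        simp at htag
        simp [htag, hvk]
      | succ k =>
        have : v ∈ pvOccList xs tag (s+1) :=
          (ih (s+1)).mpr ⟨k, by simpa using hk, by omega, by simpa using htag⟩
        split <;> simp [this]

theorem pvOccList_sorted (seq : List String) (tag : String) (s : Int) :
    (pvOccList seq tag s).Pairwise (· < ·) := by
  induction seq generalizing s with
  | nil => simp [pvOccList]
  | cons x xs ih =>
    simp only [pvOccList]
    split
    · refine List.Pairwise.cons ?_ (ih (s+1))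
      intro v hv
      rcases (pvOccList_mem _ _ _ _).mp hv with ⟨k, hk, hvk, _⟩
      omega
    · exact ih (s+1)

theorem pvFindFrom_none (seq : List String) (tag : String) (j : Nat) :
    pvFindFrom seq tag j = none ↔ ∀ k : Nat, j ≤ k → ∀ h : k < seq.length, seq[k] ≠ tag := by
  induction hn : seq.length - j using Nat.strong_induction_on generalizing j with
  | _ n ih =>
    unfold pvFindFrom
    by_cases h : j < seq.length
    · rw [dif_pos h]
      by_cases ht : seq[j] = tag
      · simp only [if_pos ht]
        constructor
        · intro hf; exact absurd hf (by simp)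
        · intro hall; exact absurd ht (hall j le_rfl h)
      · rw [if_neg ht]
        rw [ih (seq.length - (j+1)) (by omega) (j+1) rfl]
        constructor
        · intro hall k hk hkl
          rcases Nat.eq_or_lt_of_le hk with rfl | hlt
          · exact ht
          · exact hall k hlt hkl
        · intro hall k hk hkl; exact hall k (by omega) hkl
    · rw [dif_neg h]
      constructor
      · intro _ k hk hkl; omega
      · intro _; rfl

theorem pvFindFrom_some (seq : List String) (tag : String) (j i : Nat)
    (h : pvFindFrom seq tag j = some i) :
    j ≤ i ∧ ∃ hi : i < seq.length, seq[i] = tag ∧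
      ∀ k : Nat, j ≤ k → k < i → ∀ hk : k < seq.length, seq[k] ≠ tag := by
  induction hn : seq.length - j using Nat.strong_induction_on generalizing j with
  | _ n ih =>
    rw [pvFindFrom] at h
    by_cases hj : j < seq.length
    · rw [dif_pos hj] at h
      by_cases ht : seq[j] = tag
      · rw [if_pos ht] at h
        obtain rfl : j = i := by simpa using h
        exact ⟨le_rfl, hj, ht, fun k hk hk2 _ _ => by omega⟩
      · rw [if_neg ht] at h
        obtain ⟨h1, h2, h3, h4⟩ := ih (seq.length - (j+1)) (by omega) (j+1) h rfl
        refine ⟨by omega, h2, h3, ?_⟩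
        intro k hk hki hkl
        rcases Nat.eq_or_lt_of_le hk with rfl | hlt
        · exact ht
        · exact h4 k hlt hki hkl
    · rw [dif_neg hj] at h; exact absurd h (by simp)

theorem pvLB_spec (a : List Int) (x : Int) (lo hi : Nat)
    (hhi : hi ≤ a.length) (hlohi : lo ≤ hi)
    (hmono : a.Pairwise (· ≤ ·))
    (hlo : ∀ q, ∀ _ : q < a.length, q < lo → a[q] < x)
    (hup : ∀ q, ∀ _ : q < a.length, hi ≤ q → x ≤ a[q]) :
    lo ≤ pvLB a x lo hi ∧ pvLB a x lo hi ≤ hi ∧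
      (∀ q, ∀ _ : q < a.length, q < pvLB a x lo hi → a[q] < x) ∧
      (∀ q, ∀ _ : q < a.length, pvLB a x lo hi ≤ q → x ≤ a[q]) := by
  induction hn : hi - lo using Nat.strong_induction_on generalizing lo hi with
  | _ n ih =>
    rw [pvLB]
    by_cases h : lo < hi
    · rw [dif_pos h]
      have hmid : (lo + hi) / 2 < a.length := by omega
      have hg : a.getD ((lo + hi) / 2) 0 = a[(lo + hi) / 2] := List.getD_eq_getElem a 0 hmid
      by_cases hc : a.getD ((lo + hi) / 2) 0 < x
      · rw [if_pos hc]
        have hlo' : ∀ q, ∀ hq : q < a.length, q < (lo + hi) / 2 + 1 → a[q] < x := by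
          intro q hq hql
          by_cases hql2 : q < lo
          · exact hlo q hq hql2
          · rcases Nat.lt_or_ge q ((lo + hi) / 2) with h2 | h2
            · have := (List.pairwise_iff_getElem.mp hmono) q ((lo + hi) / 2) hq hmid h2
              rw [hg] at hc; omega
            · have : q = (lo + hi) / 2 := by omega
              subst this; rw [hg] at hc; exact hc
        obtain ⟨a1, a2, a3, a4⟩ := ih (hi - ((lo + hi) / 2 + 1)) (by omega) ((lo + hi) / 2 + 1) hi hhi (by omega) hlo' hup rfl
        exact ⟨by omega, a2, a3, a4⟩
      · rw [if_neg hc]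
        have hup' : ∀ q, ∀ hq : q < a.length, (lo + hi) / 2 ≤ q → x ≤ a[q] := by
          intro q hq hql
          rcases Nat.eq_or_lt_of_le hql with rfl | h2
          · rw [hg] at hc; omega
          · have := (List.pairwise_iff_getElem.mp hmono) ((lo + hi) / 2) q hmid hq h2
            rw [hg] at hc; omega
        obtain ⟨a1, a2, a3, a4⟩ := ih ((lo + hi) / 2 - lo) (by omega) lo ((lo + hi) / 2) (by omega) (by omega) hlo hup' rfl
        exact ⟨a1, by omega, a3, a4⟩
    · rw [dif_neg h]
      have : lo = hi := by omega
      subst this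
      exact ⟨le_rfl, le_rfl, hlo, hup⟩

theorem pvStep (seq : List String) (tag : String) (j : Nat) :
    (pvFindFrom seq tag j = none →
      pvLB (pvOccList seq tag 0) (j : Int) 0 (pvOccList seq tag 0).length
        = (pvOccList seq tag 0).length) ∧
    (∀ i, pvFindFrom seq tag j = some i →
      pvLB (pvOccList seq tag 0) (j : Int) 0 (pvOccList seq tag 0).length
          < (pvOccList seq tag 0).length ∧
        (pvOccList seq tag 0).getD
          (pvLB (pvOccList seq tag 0) (j : Int) 0 (pvOccList seq tag 0).length) 0 = (i : Int)) := by
  set L := pvOccList seq tag 0 with hL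
  have hmono : L.Pairwise (· ≤ ·) := (pvOccList_sorted seq tag 0).imp (fun h => le_of_lt h)
  obtain ⟨hr0, hrlen, hbelow, habove⟩ :=
    pvLB_spec L (j : Int) 0 L.length le_rfl (Nat.zero_le _) hmono
      (fun q hq hq0 => by omega) (fun q hq hq2 => by omega)
  set r := pvLB L (j : Int) 0 L.length with hr
  have hmem : ∀ v : Int, v ∈ L ↔ ∃ k : Nat, ∃ h : k < seq.length, v = k ∧ seq[k] = tag := by
    intro v
    rw [hL, pvOccList_mem]
    constructor
    · rintro ⟨k, hk, hv, ht⟩; exact ⟨k, hk, by omega, ht⟩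
    · rintro ⟨k, hk, hv, ht⟩; exact ⟨k, hk, by omega, ht⟩
  constructor
  · intro hnone
    have hall := (pvFindFrom_none seq tag j).mp hnone
    by_contra hne
    have hrlt : r < L.length := by omega
    have hge : (j : Int) ≤ L[r] := habove r hrlt le_rfl
    obtain ⟨k, hk, hv, ht⟩ := (hmem L[r]).mp (L.getElem_mem hrlt)
    exact hall k (by omega) hk ht
  · intro i hsome
    obtain ⟨hji, hi, hti, hmin⟩ := pvFindFrom_some seq tag j i hsome
    have hiL : (i : Int) ∈ L := (hmem _).mpr ⟨i, hi, rfl, hti⟩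
    obtain ⟨qi, hqi, hLqi⟩ := List.getElem_of_mem hiL
    have hrqi : r ≤ qi := by
      by_contra hlt
      have := hbelow qi hqi (by omega)
      rw [hLqi] at this; omega
    have hrlt : r < L.length := by omega
    refine ⟨hrlt, ?_⟩
    rw [List.getD_eq_getElem L 0 hrlt]
    obtain ⟨k, hk, hv, ht⟩ := (hmem L[r]).mp (L.getElem_mem hrlt)
    have hge : (j : Int) ≤ L[r] := habove r hrlt le_rfl
    have hky : j ≤ k := by omega
    have hik : i ≤ k := by
      by_contra hik
      exact hmin k hky (by omega) hk ht
    have hle : L[r] ≤ i := by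
      rcases Nat.eq_or_lt_of_le hrqi with rfl | hlt
      · omega
      · have := (List.pairwise_iff_getElem.mp hmono) r qi hrlt hqi hlt
        omega
    omega

theorem pvLoops_eq (backbone seq : List String) (j : Nat) :
    pvAltLoop (pvBuildOcc seq) backbone (j : Int) = pvALoop seq backbone j := by
  induction backbone generalizing j with
  | nil => rfl
  | cons tag rest ih =>
    simp only [pvAltLoop, pvALoop, pvBuildOcc_getD]
    obtain ⟨hnone, hsome⟩ := pvStep seq tag j
    cases hf : pvFindFrom seq tag j with
    | none => rw [if_pos (hnone hf)]
    | some i =>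
      obtain ⟨hlt, hgd⟩ := hsome i hf
      rw [if_neg (by omega), hgd]
      have : ((i : Int) + 1) = ((i + 1 : Nat) : Int) := by push_cast; ring
      rw [this, ih]

-- ===== VERDICT (by name: the statement is the Claim_ definition above) =====
theorem map_to_backbone_py_spec : Claim_equal_map_to_backbone_py := by
  intro seq backbone _ _
  unfold Spec_map_to_backbone_py map_to_backbone_py map_to_backbone_py_alt
  have h := pvLoops_eq backbone seq 0
  simpa using h.symm
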